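-- pv_equiv track=rewrite | github.com/smyarga/Advent-of-Code-2024 | Day 5/day5_topological_dfs.py | main_function
-- ===== SOURCE A (Python) =====
-- def main_function(dct: dict[str, set[str]], data: list[list[str]]) -> tuple:
--     """
--     Processes the data to separate it into correct and incorrect lists
--     based on the dictionary.
--
--     Each line in the data is checked against the dictionary. If a line
--     contains an element that is a key in the dictionary and the subsequent
--     elements are not a subset of the dictionary values for that key, or if
--     there is an intersection with previous elements, the line is considered
--     incorrect.
--
--     Args:
--         dct dict[str, set[str]]: A dictionary mapping keys to sets of values.
--         data list[list[str]]: A list of lists of strings to be processed.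
--
--     Returns:
--         tuple[list[list[str]], list[list[str]]]: A tuple containing two list
--         of lists: the first with correct lines and the second with incorrect
--         lines.
--     """
--     result_correct, result_incorrect = [], []
--     for line in data:
--         for i, el in enumerate(line):
--             if (el in dct) and (not (set(line[i+1:]) <= dct[el])
--                                 or dct[el] & set(line[:i])):
--                 result_incorrect.append(line)
--                 break
--         else:
--             result_correct.append(line)
--     return result_correct, result_incorrect
-- ===== SOURCE B (Python) =====
-- def main_function(dct: dict[str, set[str]], data: list[list[str]]) -> tuple:
--     """Pairwise re-implementation: a line is incorrect iff some ordered pair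
--     (a before b) violates a rule; no prefix/suffix sets are built."""
--     result_correct, result_incorrect = [], []
--     for line in data:
--         if _no_bad_pair(dct, line):
--             result_correct.append(line)
--         else:
--             result_incorrect.append(line)
--     return result_correct, result_incorrect
--
--
-- def _no_bad_pair(dct, line):
--     rest = line
--     while rest:
--         a, rest = rest[0], rest[1:]
--         for b in rest:
--             if (a in dct and b not in dct[a]) or (b in dct and a in dct[b]):
--                 return False
--     return True
-- ===== Notes on version B (the rewrite author's own statement) =====
-- stated objective: alternative
-- what changed: Replaces per-position set construction (set(line[i+1:]) subset test and dct[el] & set(line[:i]) intersection) by a single pairwise scan over ordered pairs that maintains no sets at all and checks both directional rules on each pair.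
import Mathlib
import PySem

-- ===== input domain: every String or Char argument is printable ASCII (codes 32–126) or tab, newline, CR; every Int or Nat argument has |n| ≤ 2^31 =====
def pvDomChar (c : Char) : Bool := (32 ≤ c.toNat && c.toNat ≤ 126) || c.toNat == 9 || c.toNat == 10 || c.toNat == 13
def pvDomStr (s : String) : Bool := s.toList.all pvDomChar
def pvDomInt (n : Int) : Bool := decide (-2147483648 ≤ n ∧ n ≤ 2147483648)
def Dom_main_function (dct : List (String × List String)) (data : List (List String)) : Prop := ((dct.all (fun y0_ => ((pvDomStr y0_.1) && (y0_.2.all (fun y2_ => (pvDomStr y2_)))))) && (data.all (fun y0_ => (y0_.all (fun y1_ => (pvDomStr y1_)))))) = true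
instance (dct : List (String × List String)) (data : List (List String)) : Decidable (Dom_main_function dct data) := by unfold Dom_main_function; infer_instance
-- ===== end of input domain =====

-- B checks each ordered pair of positions directly instead of building a set of the
-- suffix / prefix at every position; same result, no set construction (objective: alternative).

-- dict lookup (first match), shared by both ports: 'el in dct' / 'dct[el]'
def pvLookup (dct : List (String × List String)) (k : String) : Option (List String) :=
  List.lookup k dct

-- ===== PORT A =====
-- the condition of A's 'if' at enumerate index i, element el
def pvCondA (dct : List (String × List String)) (ln : List String) (i : Int) (el : String) : Bool :=
  (pvLookup dct el).isSome &&
    ( !(PySem.Set.issubset (PySem.Set.ofList (PySem.List.slice ln (some (i+1)) none))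
          ((pvLookup dct el).getD []))
      || !((PySem.Set.inter (PySem.Set.ofList ((pvLookup dct el).getD []))
              (PySem.List.slice ln none (some i))).isEmpty) )

-- A's inner 'for … else' over enumerate(ln): true = broke (incorrect ln)
def pvLoopA (dct : List (String × List String)) (ln : List String) : List (Int × String) → Bool
  | [] => false
  | (i, el) :: rest => if pvCondA dct ln i el then true else pvLoopA dct ln rest

def main_function (dct : List (String × List String)) (data : List (List String)) : List (List String) × List (List String) :=
  data.foldl
    (fun acc ln =>
      if pvLoopA dct ln (PySem.List.enumerate ln 0) then (acc.1, acc.2 ++ [ln])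
      else (acc.1 ++ [ln], acc.2))
    ([], [])

-- ===== PORT B =====
-- the rule check for one ordered pair (a before b)
def pvPairBad (dct : List (String × List String)) (a b : String) : Bool :=
  ((pvLookup dct a).isSome && !(((pvLookup dct a).getD []).contains b))
  || ((pvLookup dct b).isSome && (((pvLookup dct b).getD []).contains a))

-- B's 'while rest: a, rest = rest[0], rest[1:]; for b in rest: …'
def pvNoBadPair (dct : List (String × List String)) : List String → Bool
  | [] => true
  | a :: rest => if rest.any (fun b => pvPairBad dct a b) then false else pvNoBadPair dct rest

def main_function_alt (dct : List (String × List String)) (data : List (List String)) : List (List String) × List (List String) :=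
  data.foldl
    (fun acc ln =>
      if pvNoBadPair dct ln then (acc.1 ++ [ln], acc.2)
      else (acc.1, acc.2 ++ [ln]))
    ([], [])

-- ===== PRECONDITION & SPEC =====
def Spec_main_function (dct : List (String × List String)) (data : List (List String)) (out : List (List String) × List (List String)) : Prop := out = main_function_alt dct data
instance (dct : List (String × List String)) (data : List (List String)) (out : List (List String) × List (List String)) : Decidable (Spec_main_function dct data out) := by unfold Spec_main_function; infer_instance

-- ===== CLAIM (what is proved, stated in full; the proofs are below) =====
def Claim_equal_main_function : Prop := ∀ (dct : List (String × List String)) (data : List (List String)), Dom_main_function dct data → Spec_main_function dct data (main_function dct data)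

-- ===== LEMMAS AND PROOFS =====

-- A's break-loop is List.any of its condition over enumerate(ln)
theorem pvLoopA_eq_any (dct : List (String × List String)) (ln : List String)
    (l : List (Int × String)) :
    pvLoopA dct ln l = l.any (fun p => pvCondA dct ln p.1 p.2) := by
  induction l with
  | nil => rfl
  | cons p rest ih =>
    obtain ⟨i, el⟩ := p
    by_cases h : pvCondA dct ln i el = true <;> simp [pvLoopA, h, ih]

-- B's loop says: no ordered pair violates (Pairwise)
theorem pvNoBadPair_iff_pairwise (dct : List (String × List String)) (ln : List String) :
    pvNoBadPair dct ln = true ↔ ln.Pairwise (fun a b => ¬ pvPairBad dct a b = true) := by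
  induction ln with
  | nil => simp [pvNoBadPair]
  | cons a rest ih =>
    cases h : rest.any (fun b => pvPairBad dct a b) with
    | true =>
      simp only [pvNoBadPair, h, if_true, List.pairwise_cons]
      simp only [List.any_eq_true] at h
      obtain ⟨b, hb, hbad⟩ := h
      constructor
      · intro hfalse; cases hfalse
      · rintro ⟨hall, -⟩; exact absurd hbad (hall b hb)
    | false =>
      have h' : ∀ b ∈ rest, ¬ pvPairBad dct a b = true := by
        simpa [List.any_eq_false] using h
      simp only [pvNoBadPair, h, List.pairwise_cons]
      simp only [Bool.false_eq_true, if_false, ih]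
      constructor
      · intro hr; exact ⟨h', hr⟩
      · rintro ⟨-, hr⟩; exact hr

-- A's per-position condition, read as an index statement about the ln
theorem pvCondA_iff (dct : List (String × List String)) (ln : List String) (k : Nat)
    (hk : k < ln.length) :
    pvCondA dct ln (k : Int) (ln[k]) = true ↔
      (pvLookup dct ln[k]).isSome = true ∧
        ((∃ j, ∃ hj : j < ln.length, k < j ∧
            ln[j] ∉ (pvLookup dct ln[k]).getD []) ∨
         (∃ j, ∃ hj : j < ln.length, j < k ∧
            ln[j] ∈ (pvLookup dct ln[k]).getD [])) := by
  have h1 : ((k : Int) + 1) = ((k + 1 : Nat) : Int) := by push_cast; ring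
  unfold pvCondA
  rw [h1, PySem.List.slice_from_natCast, PySem.List.slice_to_natCast]
  simp only [Bool.and_eq_true, Bool.or_eq_true, Bool.not_eq_true']
  constructor
  · rintro ⟨hsome, hrest⟩
    refine ⟨hsome, ?_⟩
    rcases hrest with hsub | hint
    · rw [Bool.eq_false_iff, ne_eq, PySem.Set.issubset_iff] at hsub
      push Not at hsub
      obtain ⟨x, hx, hnx⟩ := hsub
      rw [PySem.Set.mem_ofList, List.mem_drop_iff_getElem] at hx
      obtain ⟨j, hm, hx⟩ := hx
      refine Or.inl ⟨k + 1 + j, by omega, by omega, ?_⟩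
      rw [hx]; exact hnx
    · simp only [List.isEmpty_eq_false_iff_exists_mem] at hint
      obtain ⟨x, hx⟩ := hint
      rw [PySem.Set.mem_inter, PySem.Set.mem_ofList, List.mem_take_iff_getElem] at hx
      obtain ⟨hxv, j, hm, hx⟩ := hx
      refine Or.inr ⟨j, by omega, by omega, ?_⟩
      rw [hx]; exact hxv
  · rintro ⟨hsome, hcase⟩
    refine ⟨hsome, ?_⟩
    rcases hcase with ⟨j, hj, hkj, hnot⟩ | ⟨j, hj, hjk, hmem⟩
    · refine Or.inl ?_
      rw [Bool.eq_false_iff, ne_eq, PySem.Set.issubset_iff]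
      push Not
      refine ⟨ln[j], ?_, hnot⟩
      rw [PySem.Set.mem_ofList, List.mem_drop_iff_getElem]
      exact ⟨j - (k + 1), by omega, by simp only [show k + 1 + (j - (k + 1)) = j from by omega]⟩
    · refine Or.inr ?_
      simp only [List.isEmpty_eq_false_iff_exists_mem]
      refine ⟨ln[j], ?_⟩
      rw [PySem.Set.mem_inter, PySem.Set.mem_ofList, List.mem_take_iff_getElem]
      exact ⟨hmem, j, by omega, rfl⟩

-- membership in dct[x] via Bool contains (String has LawfulBEq)
theorem pvPairBad_iff (dct : List (String × List String)) (a b : String) :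
    pvPairBad dct a b = true ↔
      ((pvLookup dct a).isSome = true ∧ b ∉ (pvLookup dct a).getD []) ∨
      ((pvLookup dct b).isSome = true ∧ a ∈ (pvLookup dct b).getD []) := by
  unfold pvPairBad
  simp

-- per ln: A breaks out of its loop exactly when B finds a bad pair
theorem key_line (dct : List (String × List String)) (ln : List String) :
    pvLoopA dct ln (PySem.List.enumerate ln 0) = !pvNoBadPair dct ln := by
  rw [pvLoopA_eq_any, Bool.eq_iff_iff]
  simp only [Bool.not_eq_true', Bool.eq_false_iff, ne_eq]
  rw [pvNoBadPair_iff_pairwise, List.pairwise_iff_getElem]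
  push Not
  simp only [List.any_eq_true]
  constructor
  · rintro ⟨⟨i, el⟩, hmem, hcond⟩
    rw [PySem.List.mem_enumerate_iff] at hmem
    obtain ⟨k, hk, hp⟩ := hmem
    cases hp
    rw [zero_add] at hcond
    rw [pvCondA_iff dct ln k hk] at hcond
    obtain ⟨hsome, hcase⟩ := hcond
    rcases hcase with ⟨j, hj, hkj, hnot⟩ | ⟨j, hj, hjk, hmm⟩
    · exact ⟨k, j, hk, hj, hkj, by rw [pvPairBad_iff]; exact Or.inl ⟨hsome, hnot⟩⟩
    · exact ⟨j, k, hj, hk, hjk, by rw [pvPairBad_iff]; exact Or.inr ⟨hsome, hmm⟩⟩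
  · rintro ⟨i2, j2, hi2, hj2, hij, hbad⟩
    rw [pvPairBad_iff] at hbad
    rcases hbad with ⟨hsome, hnot⟩ | ⟨hsome, hmm⟩
    · refine ⟨((i2 : Int), (ln[i2])), ?_, ?_⟩
      · rw [PySem.List.mem_enumerate_iff]; exact ⟨i2, hi2, by simp⟩
      · rw [pvCondA_iff dct ln i2 hi2]; exact ⟨hsome, Or.inl ⟨j2, hj2, hij, hnot⟩⟩
    · refine ⟨((j2 : Int), (ln[j2])), ?_, ?_⟩
      · rw [PySem.List.mem_enumerate_iff]; exact ⟨j2, hj2, by simp⟩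
      · rw [pvCondA_iff dct ln j2 hj2]; exact ⟨hsome, Or.inr ⟨i2, hi2, hij, hmm⟩⟩

-- ===== VERDICT (by name: the statement is the Claim_ definition above) =====
theorem main_function_spec : Claim_equal_main_function := by
  intro dct data _
  unfold Spec_main_function main_function main_function_alt
  have hstep : (fun (acc : List (List String) × List (List String)) ln =>
      if pvLoopA dct ln (PySem.List.enumerate ln 0) then (acc.1, acc.2 ++ [ln])
      else (acc.1 ++ [ln], acc.2)) =
      (fun (acc : List (List String) × List (List String)) ln =>
      if pvNoBadPair dct ln then (acc.1 ++ [ln], acc.2)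
      else (acc.1, acc.2 ++ [ln])) := by
    funext acc ln
    rw [key_line]
    rcases pvNoBadPair dct ln <;> simp
  rw [hstep]
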